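-- pv_equiv track=rewrite | github.com/TheMightyJew/EA_Project | Calcudoku.py | partition_possible_values_sum_rec
-- ===== SOURCE A (Python) =====
-- def partition_possible_values_sum_rec(partition_length, answer, array, board_size, so_far_string, possible,
--                                       index_possible):
--     if partition_length == 0 and answer == 0 and index_possible == len(possible):  # success
--         toAppend = '%s' % so_far_string[:-1]
--         split = toAppend.split(",")
--         if len(set(split)) == len(split):
--             array.append(toAppend)
--         return array
--     if partition_length == 0 or answer <= 0 or index_possible == len(possible):  # fail
--         return array
--     num_of_times = len(possible[index_possible])
--     min_val = min(board_size, int(answer / num_of_times))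
--     for i in range(1, min_val + 1):
--         partition_possible_values_sum_rec(partition_length - num_of_times, answer - num_of_times * i, array, board_size,
--                                           '%s%s,' % (so_far_string, i), possible, index_possible + 1)
--     return array
-- ===== SOURCE B (Python) =====
-- from itertools import product
--
--
-- def partition_possible_values_sum_rec(partition_length, answer, array, board_size, so_far_string, possible,
--                                       index_possible):
--     groups = possible[index_possible:]
--     sizes = [len(g) for g in groups]
--     if sum(sizes) != partition_length:
--         return array
--     axes = [range(1, min(board_size, answer // n) + 1) for n in sizes]
--     for combo in product(*axes):
--         if sum(n * i for n, i in zip(sizes, combo)) != answer: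
--             continue
--         to_append = (so_far_string + ''.join('%s,' % i for i in combo))[:-1]
--         parts = to_append.split(",")
--         if len(set(parts)) == len(parts):
--             array.append(to_append)
--     return array
-- ===== Notes on version B (the rewrite author's own statement) =====
-- stated objective: alternative
-- what changed: A's pruned recursive DFS over groups is replaced by a single non-recursive pass: slice off the remaining groups, check the group-size sum once, then enumerate the Cartesian product of per-group ranges with itertools.product and keep exactly the tuples whose weighted sum equals answer.
-- outside the precondition, e.g. on partition_possible_values_sum_rec(4, 6, [], 2, '', [[1, 3]], -1): A returns ['1,2', '2,1'], B returns []; on partition_possible_values_sum_rec(0, 0, [], 3, '', [[1]], 5): A returns [], B returns ['']; on partition_possible_values_sum_rec(1, 1, [], 3, '', [[1], []], 0): A returns [], B raises ZeroDivisionError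
import Mathlib
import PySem

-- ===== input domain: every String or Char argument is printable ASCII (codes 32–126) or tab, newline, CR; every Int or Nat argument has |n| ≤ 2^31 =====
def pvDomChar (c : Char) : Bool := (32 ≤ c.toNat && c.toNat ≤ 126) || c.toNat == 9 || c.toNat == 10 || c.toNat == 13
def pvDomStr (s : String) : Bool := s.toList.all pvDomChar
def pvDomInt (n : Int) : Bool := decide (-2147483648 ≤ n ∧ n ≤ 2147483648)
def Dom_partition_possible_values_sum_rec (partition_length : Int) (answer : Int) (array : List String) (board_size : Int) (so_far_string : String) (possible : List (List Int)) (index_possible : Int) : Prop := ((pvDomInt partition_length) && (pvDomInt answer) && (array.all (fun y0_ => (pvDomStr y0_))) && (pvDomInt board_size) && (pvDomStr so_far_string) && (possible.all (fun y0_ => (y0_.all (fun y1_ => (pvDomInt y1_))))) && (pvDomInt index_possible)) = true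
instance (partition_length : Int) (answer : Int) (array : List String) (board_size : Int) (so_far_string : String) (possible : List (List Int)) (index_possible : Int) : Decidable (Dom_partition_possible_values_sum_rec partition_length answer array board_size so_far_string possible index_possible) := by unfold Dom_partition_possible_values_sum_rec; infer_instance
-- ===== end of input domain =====

-- B replaces A's pruned recursive DFS by a single Cartesian-product enumeration with a sum filter
-- (objective: alternative).  Both A and B mutate/return `array`; the appended results are identical.

-- ===== PORT A =====
-- A's recursion, with the Python for-loop transcribed as the mutual helper pvALoop over the range list.
mutual
def partition_possible_values_sum_rec (partition_length : Int) (answer : Int) (array : List String) (board_size : Int) (so_far_string : String) (possible : List (List Int)) (index_possible : Int) : List String :=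
  if partition_length = 0 ∧ answer = 0 ∧ index_possible = (possible.length : Int) then
    let toAppend := PySem.Str.slice so_far_string none (some (-1))
    let split := PySem.Chars.splitOn toAppend.toList [',']
    if (PySem.Set.ofList split).length = split.length then array ++ [toAppend] else array
  else if partition_length = 0 ∨ answer ≤ 0 ∨ index_possible = (possible.length : Int) then array
  else
    match h : PySem.List.pyGet? possible index_possible with
    | none => array  -- Python raises IndexError here; excluded by Pre_
    | some g =>
      -- int(answer / num): answer > 0 in this branch and |answer| ≤ 2^31 on Dom, so it is floor division
      pvALoop partition_length answer (g.length : Int) board_size so_far_string possible (index_possible + 1)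
        (PySem.List.pyRange 1 (min board_size (PySem.Int.floordiv answer (g.length : Int)) + 1) 1) array
  termination_by ((((possible.length : Int) + 1 - index_possible).toNat, 0) : Nat × Nat)
  decreasing_by
    have hin : ¬ (PySem.List.pyGet? possible index_possible = none) := by simp [h]
    rw [PySem.List.pyGet?_eq_none_iff] at hin
    have hlt : index_possible < (possible.length : Int) := by
      by_contra hc
      exact hin (by simp [PySem.Raise.InRange] at hc ⊢; omega)
    apply Prod.Lex.left
    omega

def pvALoop (pl : Int) (ans : Int) (num : Int) (bs : Int) (sfs : String) (possible : List (List Int)) (idxNext : Int) (is : List Int) (array : List String) : List String :=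
  match is with
  | [] => array
  | i :: rest =>
    pvALoop pl ans num bs sfs possible idxNext rest
      (partition_possible_values_sum_rec (pl - num) (ans - num * i) array bs (sfs ++ PySem.Int.toStr i ++ ",") possible idxNext)
  termination_by ((((possible.length : Int) + 1 - idxNext).toNat, is.length + 1) : Nat × Nat)
  decreasing_by
    all_goals apply Prod.Lex.right
    all_goals simp only [List.length_cons]
    all_goals omega
end

-- ===== PORT B =====
-- itertools.product(*axes), hand-ported: last axis varies fastest
def pvProd : List (List Int) → List (List Int)
  | [] => [[]]
  | r :: rs => r.flatMap (fun i => (pvProd rs).map (fun c => i :: c))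

-- ''.join(parts), hand-ported
def pvJoin : List String → String
  | [] => ""
  | s :: rest => s ++ pvJoin rest

def partition_possible_values_sum_rec_alt (partition_length : Int) (answer : Int) (array : List String) (board_size : Int) (so_far_string : String) (possible : List (List Int)) (index_possible : Int) : List String :=
  let groups := PySem.List.slice possible (some index_possible) none
  let sizes := groups.map (fun g => (g.length : Int))
  if sizes.sum ≠ partition_length then array
  else
    let axes := sizes.map (fun n => PySem.List.pyRange 1 (min board_size (PySem.Int.floordiv answer n) + 1) 1)
    (pvProd axes).foldl (fun arr combo =>
      if (List.zipWith (fun n i => n * i) sizes combo).sum ≠ answer then arr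
      else
        let toAppend := PySem.Str.slice (so_far_string ++ pvJoin (combo.map (fun i => PySem.Int.toStr i ++ ","))) none (some (-1))
        let parts := PySem.Chars.splitOn toAppend.toList [',']
        if (PySem.Set.ofList parts).length = parts.length then arr ++ [toAppend] else arr) array

-- ===== PRECONDITION & SPEC =====
-- Pre_ admits the recursion's natural domain 0 ≤ index_possible ≤ len(possible) with nonempty
-- remaining groups, plus the out-of-range indices on which A's early guards fire benignly; it
-- excludes the remaining out-of-range indices (where A raises IndexError, rereads groups through
-- Python's accidental negative-index wraparound, or can append a degenerate entry) and empty
-- groups in the suffix (where A can hit ZeroDivisionError and B's up-front division raises).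
def Pre_partition_possible_values_sum_rec (partition_length : Int) (answer : Int) (array : List String) (board_size : Int) (so_far_string : String) (possible : List (List Int)) (index_possible : Int) : Prop :=
  (0 ≤ index_possible ∧ index_possible ≤ (possible.length : Int) ∧
    ∀ g ∈ possible.drop index_possible.toNat, g ≠ []) ∨
  ((partition_length = 0 ∨ answer ≤ 0) ∧
    (((possible.length : Int) < index_possible ∧ (partition_length ≠ 0 ∨ answer ≠ 0)) ∨
     (index_possible < 0 ∧ possible ≠ [] ∧ ∀ g ∈ possible, g ≠ [])))
instance (partition_length : Int) (answer : Int) (array : List String) (board_size : Int) (so_far_string : String) (possible : List (List Int)) (index_possible : Int) : Decidable (Pre_partition_possible_values_sum_rec partition_length answer array board_size so_far_string possible index_possible) := by unfold Pre_partition_possible_values_sum_rec; infer_instance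

def pvWitness_partition_possible_values_sum_rec : Int × Int × List String × Int × String × List (List Int) × Int :=
  (3, 5, [], 4, "", [[0, 1], [2]], 0)

def Spec_partition_possible_values_sum_rec (partition_length : Int) (answer : Int) (array : List String) (board_size : Int) (so_far_string : String) (possible : List (List Int)) (index_possible : Int) (out : List String) : Prop := out = partition_possible_values_sum_rec_alt partition_length answer array board_size so_far_string possible index_possible
instance (partition_length : Int) (answer : Int) (array : List String) (board_size : Int) (so_far_string : String) (possible : List (List Int)) (index_possible : Int) (out : List String) : Decidable (Spec_partition_possible_values_sum_rec partition_length answer array board_size so_far_string possible index_possible out) := by unfold Spec_partition_possible_values_sum_rec; infer_instance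

-- ===== CLAIM (what is proved, stated in full; the proofs are below) =====
def Claim_equal_partition_possible_values_sum_rec : Prop := ∀ (partition_length : Int) (answer : Int) (array : List String) (board_size : Int) (so_far_string : String) (possible : List (List Int)) (index_possible : Int), Dom_partition_possible_values_sum_rec partition_length answer array board_size so_far_string possible index_possible → Pre_partition_possible_values_sum_rec partition_length answer array board_size so_far_string possible index_possible → Spec_partition_possible_values_sum_rec partition_length answer array board_size so_far_string possible index_possible (partition_possible_values_sum_rec partition_length answer array board_size so_far_string possible index_possible)

-- ===== LEMMAS AND PROOFS =====

-- the candidate string emitted (or not) for a finished assignment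
def emitL (sfs : String) : List String :=
  let toAppend := PySem.Str.slice sfs none (some (-1))
  let parts := PySem.Chars.splitOn toAppend.toList [',']
  if (PySem.Set.ofList parts).length = parts.length then [toAppend] else []

-- A's recursion, rephrased over the remaining suffix of groups (accumulator dropped)
def results (bs : Int) : Int → Int → String → List (List Int) → List String
  | pl, ans, sfs, [] => if pl = 0 ∧ ans = 0 then emitL sfs else []
  | pl, ans, sfs, g :: gs =>
    if pl = 0 ∨ ans ≤ 0 then []
    else
      (PySem.List.pyRange 1 (min bs (PySem.Int.floordiv ans (g.length : Int)) + 1) 1).flatMap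
        (fun i => results bs (pl - (g.length : Int)) (ans - (g.length : Int) * i) (sfs ++ PySem.Int.toStr i ++ ",") gs)

def pvAxes (bs a : Int) (gs : List (List Int)) : List (List Int) :=
  gs.map (fun g => PySem.List.pyRange 1 (min bs (PySem.Int.floordiv a (g.length : Int)) + 1) 1)

def pvDot (gs : List (List Int)) (c : List Int) : Int :=
  (List.zipWith (fun n i => n * i) (gs.map (fun g => (g.length : Int))) c).sum

-- product-then-filter over per-axis ranges computed from numerator a, keeping dot = t
def pvFMF (bs a : Int) (gs : List (List Int)) (t : Int) (f : List Int → List String) : List String :=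
  (pvProd (pvAxes bs a gs)).flatMap (fun c => if pvDot gs c = t then f c else [])

-- B's computation, rephrased over the suffix of groups (accumulator dropped)
def pvBres (bs pl ans : Int) (sfs : String) (gs : List (List Int)) : List String :=
  if (gs.map (fun g => (g.length : Int))).sum ≠ pl then []
  else pvFMF bs ans gs ans (fun c => emitL (sfs ++ pvJoin (c.map (fun i => PySem.Int.toStr i ++ ","))))

lemma pvFlatMap_congr {α β : Type} {l : List α} {f g : α → List β} (h : ∀ x ∈ l, f x = g x) :
    l.flatMap f = l.flatMap g := by
  induction l with
  | nil => rfl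
  | cons a l ih =>
    simp only [List.flatMap_cons, h a (List.mem_cons_self ..)]
    rw [ih (fun x hx => h x (List.mem_cons_of_mem _ hx))]

lemma pvProd_cons_flatMap (r : List Int) (rs : List (List Int)) (F : List Int → List String) :
    (pvProd (r :: rs)).flatMap F = r.flatMap (fun i => (pvProd rs).flatMap (fun c => F (i :: c))) := by
  simp [pvProd, List.flatMap_assoc, List.flatMap_map]

lemma pvDot_cons (g : List Int) (gs : List (List Int)) (i : Int) (c : List Int) :
    pvDot (g :: gs) (i :: c) = (g.length : Int) * i + pvDot gs c := by
  simp [pvDot]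

lemma pvDot_cons_eq (g : List Int) (gs : List (List Int)) (i : Int) (c : List Int) (t : Int) :
    (pvDot (g :: gs) (i :: c) = t) = (pvDot gs c = t - (g.length : Int) * i) := by
  rw [pvDot_cons]; apply propext; constructor <;> intro <;> omega

lemma pv_len_pos {g : List Int} (h : g ≠ []) : 1 ≤ (g.length : Int) := by
  have := List.length_pos_of_ne_nil h
  omega

-- peeling the first axis off the filtered product
lemma pvFMF_cons (bs x : Int) (g : List Int) (gs : List (List Int)) (t : Int) (f : List Int → List String) :
    pvFMF bs x (g :: gs) t f =
      (PySem.List.pyRange 1 (min bs (PySem.Int.floordiv x (g.length : Int)) + 1) 1).flatMap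
        (fun i => pvFMF bs x gs (t - (g.length : Int) * i) (fun c => f (i :: c))) := by
  simp only [pvFMF, pvAxes, List.map_cons]
  rw [pvProd_cons_flatMap]
  refine pvFlatMap_congr fun i _ => ?_
  simp only [pvDot_cons_eq]

-- if the target is negative no product tuple passes the filter
lemma pvFMF_dead (bs : Int) : ∀ (gs : List (List Int)), (∀ g ∈ gs, g ≠ []) →
    ∀ (t a : Int) (f : List Int → List String), t < 0 → pvFMF bs a gs t f = [] := by
  intro gs
  induction gs with
  | nil =>
    intro _ t a f ht
    simp only [pvFMF, pvAxes, pvDot, List.map_nil, pvProd, List.flatMap_cons, List.flatMap_nil,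
      List.zipWith_nil_left, List.sum_nil, List.append_nil]
    rw [if_neg (by omega)]
  | cons g gs ih =>
    intro hne t a f ht
    have hn : 1 ≤ (g.length : Int) := pv_len_pos (hne g (List.mem_cons_self ..))
    rw [pvFMF_cons]
    apply List.flatMap_eq_nil_iff.2
    intro i hi
    have hi1 : 1 ≤ i := (PySem.List.mem_pyRange_one.1 hi).1
    have hpos : 0 < (g.length : Int) * i := mul_pos (by omega) (by omega)
    exact ih (fun x hx => hne x (List.mem_cons_of_mem _ hx)) (t - (g.length : Int) * i) a
      (fun c => f (i :: c)) (by omega)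

-- enlarging the numerator of the per-axis bounds does not change the filtered output
lemma pvFMF_ext (bs : Int) : ∀ (gs : List (List Int)), (∀ g ∈ gs, g ≠ []) →
    ∀ (t a a' : Int) (f : List Int → List String), t ≤ a' → a' ≤ a →
    pvFMF bs a' gs t f = pvFMF bs a gs t f := by
  intro gs
  induction gs with
  | nil => intro _ t a a' f _ _; rfl
  | cons g gs ih =>
    intro hne t a a' f hta ha
    have hn : 1 ≤ (g.length : Int) := pv_len_pos (hne g (List.mem_cons_self ..))
    have hne' : ∀ x ∈ gs, x ≠ [] := fun x hx => hne x (List.mem_cons_of_mem _ hx)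
    have hdiv_le : PySem.Int.floordiv a' (g.length : Int) ≤ PySem.Int.floordiv a (g.length : Int) := by
      rw [PySem.Int.le_floordiv_iff_mul_le (by omega)]
      have h1 := PySem.Int.floordiv_mul_add_mod a' (g.length : Int)
      have h2 := PySem.Int.mod_nonneg a' (b := (g.length : Int)) (by omega)
      omega
    have hdead : ∀ i : Int, 1 ≤ i → min bs (PySem.Int.floordiv a' (g.length : Int)) < i → i ≤ bs →
        pvFMF bs a gs (t - (g.length : Int) * i) (fun c => f (i :: c)) = [] := by
      intro i h1 h2 h3
      have hdi : PySem.Int.floordiv a' (g.length : Int) < i := by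
        rcases min_lt_iff.1 h2 with h | h
        · omega
        · exact h
      have hlt : a' < i * (g.length : Int) := (PySem.Int.floordiv_lt_iff_lt_mul (by omega)).1 hdi
      rw [mul_comm] at hlt
      exact pvFMF_dead bs gs hne' _ a _ (by omega)
    rw [pvFMF_cons, pvFMF_cons]
    by_cases hb0 : 0 ≤ min bs (PySem.Int.floordiv a' (g.length : Int))
    · rw [PySem.List.pyRange_one_append 1 (min bs (PySem.Int.floordiv a' (g.length : Int)) + 1)
        (min bs (PySem.Int.floordiv a (g.length : Int)) + 1) (by omega)
        (by have := min_le_min (le_refl bs) hdiv_le; omega), List.flatMap_append]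
      have hcut : (PySem.List.pyRange (min bs (PySem.Int.floordiv a' (g.length : Int)) + 1)
          (min bs (PySem.Int.floordiv a (g.length : Int)) + 1) 1).flatMap
          (fun i => pvFMF bs a gs (t - (g.length : Int) * i) (fun c => f (i :: c))) = [] := by
        apply List.flatMap_eq_nil_iff.2
        intro i hi
        rcases PySem.List.mem_pyRange_one.1 hi with ⟨hi1, hi2⟩
        have hbsle := min_le_left bs (PySem.Int.floordiv a (g.length : Int))
        exact hdead i (by omega) (by omega) (by omega)
      rw [hcut, List.append_nil]
      refine pvFlatMap_congr fun i hi => ?_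
      rcases PySem.List.mem_pyRange_one.1 hi with ⟨hi1, hi2⟩
      have hnn : 0 ≤ (g.length : Int) * i := mul_nonneg (by omega) (by omega)
      exact ih hne' (t - (g.length : Int) * i) a a' (fun c => f (i :: c)) (by omega) ha
    · rw [PySem.List.pyRange_one_eq_nil (by omega), List.flatMap_nil]
      symm
      apply List.flatMap_eq_nil_iff.2
      intro i hi
      rcases PySem.List.mem_pyRange_one.1 hi with ⟨hi1, hi2⟩
      have hbsle := min_le_left bs (PySem.Int.floordiv a (g.length : Int))
      exact hdead i (by omega) (by omega) (by omega)

-- A's suffix recursion equals B's filtered product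
lemma results_eq_pvBres (bs : Int) : ∀ (gs : List (List Int)), (∀ g ∈ gs, g ≠ []) →
    ∀ (pl ans : Int) (sfs : String), results bs pl ans sfs gs = pvBres bs pl ans sfs gs := by
  intro gs
  induction gs with
  | nil =>
    intro _ pl ans sfs
    simp only [results, pvBres, pvFMF, pvAxes, pvDot, List.map_nil, List.sum_nil, pvProd,
      List.flatMap_cons, List.flatMap_nil, List.zipWith_nil_left, List.append_nil,
      pvJoin, String.append_empty]
    by_cases h1 : pl = 0 ∧ ans = 0
    · rw [if_pos h1, if_neg (by omega), if_pos (by omega)]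
    · rw [if_neg h1]
      by_cases h2 : (0 : Int) ≠ pl
      · rw [if_pos h2]
      · rw [if_neg h2, if_neg (by omega)]
  | cons g gs ih =>
    intro hne pl ans sfs
    have hn : 1 ≤ (g.length : Int) := pv_len_pos (hne g (List.mem_cons_self ..))
    have hne' : ∀ x ∈ gs, x ≠ [] := fun x hx => hne x (List.mem_cons_of_mem _ hx)
    have hsum0 : 0 ≤ (gs.map (fun g => ((g.length : Int)))).sum := by
      apply List.sum_nonneg
      intro x hx
      simp only [List.mem_map] at hx
      rcases hx with ⟨y, _, rfl⟩
      omega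
    simp only [results, pvBres, List.map_cons, List.sum_cons]
    by_cases hguard : pl = 0 ∨ ans ≤ 0
    · rw [if_pos hguard]
      by_cases hS : (g.length : Int) + (gs.map (fun g => ((g.length : Int)))).sum = pl
      · rw [if_neg (by omega)]
        rcases hguard with hp | hans
        · exact absurd hS (by omega)
        · symm
          rw [pvFMF_cons]
          have hdv : PySem.Int.floordiv ans (g.length : Int) < 1 :=
            (PySem.Int.floordiv_lt_iff_lt_mul (by omega)).2 (by omega)
          rw [PySem.List.pyRange_one_eq_nil (by have := min_le_right bs (PySem.Int.floordiv ans (g.length : Int)); omega)]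
          exact List.flatMap_nil
      · rw [if_pos (by omega)]
    · rw [if_neg hguard]
      rw [not_or] at hguard
      simp only [ih hne']
      by_cases hS : (g.length : Int) + (gs.map (fun g => ((g.length : Int)))).sum = pl
      · rw [if_neg (by omega), pvFMF_cons]
        refine pvFlatMap_congr fun i hi => ?_
        rcases PySem.List.mem_pyRange_one.1 hi with ⟨hi1, _⟩
        have hnn : 0 ≤ (g.length : Int) * i := mul_nonneg (by omega) (by omega)
        rw [pvBres, if_neg (by omega)]
        rw [pvFMF_ext bs gs hne' (ans - (g.length : Int) * i) ans (ans - (g.length : Int) * i)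
          (fun c => emitL ((sfs ++ PySem.Int.toStr i ++ ",") ++ pvJoin (c.map (fun j => PySem.Int.toStr j ++ ",")))) le_rfl (by omega)]
        refine pvFlatMap_congr fun c _ => ?_
        simp only [List.map_cons, pvJoin, String.append_assoc]
      · rw [if_pos (by omega)]
        apply List.flatMap_eq_nil_iff.2
        intro i _
        rw [pvBres, if_pos (by omega)]

-- the loop helper, assuming the characterisation one level down
lemma pvALoop_eq (bs num : Int) (possible : List (List Int)) (idxNext : Int) (gs : List (List Int))
    (H : ∀ pl ans array sfs, partition_possible_values_sum_rec pl ans array bs sfs possible idxNext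
        = array ++ results bs pl ans sfs gs) :
    ∀ (is : List Int) (pl ans : Int) (sfs : String) (array : List String),
      pvALoop pl ans num bs sfs possible idxNext is array =
        array ++ is.flatMap (fun i => results bs (pl - num) (ans - num * i) (sfs ++ PySem.Int.toStr i ++ ",") gs) := by
  intro is
  induction is with
  | nil => intro pl ans sfs array; rw [pvALoop]; simp
  | cons i rest ihl =>
    intro pl ans sfs array
    rw [pvALoop, H, ihl, List.flatMap_cons, List.append_assoc]

-- A's port equals its suffix recursion
lemma pvA_eq (bs : Int) : ∀ (gs : List (List Int)) (possible : List (List Int)) (idx : Int),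
    0 ≤ idx → idx + (gs.length : Int) = (possible.length : Int) → possible.drop idx.toNat = gs →
    ∀ (pl ans : Int) (array : List String) (sfs : String),
      partition_possible_values_sum_rec pl ans array bs sfs possible idx = array ++ results bs pl ans sfs gs := by
  intro gs
  induction gs with
  | nil =>
    intro possible idx h0 hlen _ pl ans array sfs
    have hidx : idx = (possible.length : Int) := by simpa using hlen
    rw [partition_possible_values_sum_rec]
    by_cases h1 : pl = 0 ∧ ans = 0
    · rw [if_pos (show pl = 0 ∧ ans = 0 ∧ idx = (possible.length : Int) from ⟨h1.1, h1.2, hidx⟩)]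
      simp only [results, if_pos h1, emitL]
      split_ifs <;> simp
    · rw [if_neg (by tauto), if_pos (by tauto)]
      simp only [results, if_neg h1, List.append_nil]
  | cons g gs ih =>
    intro possible idx h0 hlen hdrop pl ans array sfs
    have hlen' : idx + 1 + (gs.length : Int) = (possible.length : Int) := by
      simp only [List.length_cons] at hlen; push_cast at hlen ⊢; omega
    have hlt : idx < (possible.length : Int) := by omega
    have hget : PySem.List.pyGet? possible idx = some g := by
      rw [PySem.List.pyGet?_of_nonneg possible h0]
      have h1 : (possible.drop idx.toNat)[0]? = some g := by rw [hdrop]; rfl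
      rw [List.getElem?_drop] at h1
      simpa using h1
    have hdrop' : possible.drop (idx + 1).toNat = gs := by
      rw [show (idx + 1).toNat = idx.toNat + 1 by omega, ← List.drop_drop, hdrop]
      rfl
    have H : ∀ pl' ans' array' sfs',
        partition_possible_values_sum_rec pl' ans' array' bs sfs' possible (idx + 1)
          = array' ++ results bs pl' ans' sfs' gs :=
      fun pl' ans' array' sfs' => ih possible (idx + 1) (by omega) hlen' hdrop' pl' ans' array' sfs'
    rw [partition_possible_values_sum_rec]
    rw [if_neg (by rintro ⟨_, _, hc⟩; omega)]
    by_cases h2 : pl = 0 ∨ ans ≤ 0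
    · rw [if_pos (by tauto)]
      simp only [results, if_pos h2, List.append_nil]
    · rw [if_neg (by rintro (hc | hc | hc); exacts [h2 (Or.inl hc), h2 (Or.inr hc), by omega])]
      split
      · next heq => simp [hget] at heq
      · next g' heq =>
        rw [hget] at heq
        injection heq with heq'
        subst heq'
        rw [pvALoop_eq bs (g.length : Int) possible (idx + 1) gs H]
        simp only [results, if_neg h2]

-- B's fold over the product, as append of a flatMap
lemma pvBfold_eq (ansv : Int) (sfs : String) (S : List Int) :
    ∀ (l : List (List Int)) (arr : List String),
      l.foldl (fun arr combo =>
        if (List.zipWith (fun n i => n * i) S combo).sum ≠ ansv then arr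
        else
          let toAppend := PySem.Str.slice (sfs ++ pvJoin (combo.map (fun i => PySem.Int.toStr i ++ ","))) none (some (-1))
          let parts := PySem.Chars.splitOn toAppend.toList [',']
          if (PySem.Set.ofList parts).length = parts.length then arr ++ [toAppend] else arr) arr
      = arr ++ l.flatMap (fun combo =>
          if (List.zipWith (fun n i => n * i) S combo).sum = ansv then
            emitL (sfs ++ pvJoin (combo.map (fun i => PySem.Int.toStr i ++ ","))) else []) := by
  intro l
  induction l with
  | nil => intro arr; simp
  | cons c l ihl =>
    intro arr
    simp only [List.foldl_cons, List.flatMap_cons]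
    by_cases hc : (List.zipWith (fun n i => n * i) S c).sum = ansv
    · rw [if_neg (by omega), if_pos hc, ihl]
      simp only [emitL]
      split_ifs <;> simp
    · rw [if_pos hc, if_neg hc, ihl]
      simp

-- B's port equals its suffix form
lemma pvB_eq (pl ans : Int) (array : List String) (bs : Int) (sfs : String)
    (possible : List (List Int)) (idx : Int) (h0 : 0 ≤ idx) :
    partition_possible_values_sum_rec_alt pl ans array bs sfs possible idx =
      array ++ pvBres bs pl ans sfs (possible.drop idx.toNat) := by
  unfold partition_possible_values_sum_rec_alt
  dsimp only
  rw [PySem.List.slice_from possible h0]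
  simp only [pvBres]
  by_cases hsum : (List.map (fun g => ((g.length : Int))) (List.drop idx.toNat possible)).sum ≠ pl
  · rw [if_pos hsum, if_pos hsum]
    simp
  · rw [if_neg hsum, if_neg hsum]
    rw [pvBfold_eq ans sfs (List.map (fun g => ((g.length : Int))) (List.drop idx.toNat possible))]
    congr 1
    simp only [pvFMF, pvAxes, pvDot, List.map_map]
    rfl

-- on the guard-benign out-of-range indices both ports return `array` unchanged
lemma pvBenign_eq (pl ans : Int) (array : List String) (bs : Int) (sfs : String)
    (possible : List (List Int)) (idx : Int)
    (hguard : pl = 0 ∨ ans ≤ 0)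
    (hcase : ((possible.length : Int) < idx ∧ (pl ≠ 0 ∨ ans ≠ 0)) ∨
      (idx < 0 ∧ possible ≠ [] ∧ ∀ g ∈ possible, g ≠ [])) :
    partition_possible_values_sum_rec pl ans array bs sfs possible idx =
      partition_possible_values_sum_rec_alt pl ans array bs sfs possible idx := by
  rw [partition_possible_values_sum_rec]
  rw [if_neg (by
    rintro ⟨hA, hB, hC⟩
    rcases hcase with ⟨hgt, _⟩ | ⟨hneg, hpne, _⟩
    · omega
    · have := List.length_pos_of_ne_nil hpne; omega)]
  rw [if_pos (by tauto)]
  symm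
  unfold partition_possible_values_sum_rec_alt
  dsimp only
  rcases hcase with ⟨hgt, hne0⟩ | ⟨hneg, hpne, hall⟩
  · rw [PySem.List.slice_from possible (by omega)]
    rw [List.drop_eq_nil_of_le (by omega)]
    simp only [List.map_nil, List.sum_nil]
    by_cases hp : pl = 0
    · have hans : ans ≠ 0 := by tauto
      rw [if_neg (by omega)]
      simp only [List.map_nil, pvProd, List.foldl_cons, List.foldl_nil,
        List.zipWith_nil_left, List.sum_nil]
      rw [if_pos (show (0 : Int) ≠ ans from by omega)]
    · rw [if_pos (by omega)]
  · have hlenpos : 0 < possible.length := List.length_pos_of_ne_nil hpne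
    rw [PySem.List.slice_some_none]
    have hmlt : PySem.List.clampIdx possible.length idx < possible.length := by
      have hk : idx = -(((-idx).toNat : Nat) : Int) := by omega
      have h2 := PySem.List.clampIdx_neg_natCast (n := possible.length) (k := (-idx).toNat) (by omega)
      rw [hk, h2]
      omega
    have hsufne : possible.drop (PySem.List.clampIdx possible.length idx) ≠ [] := by
      intro hc
      have := List.drop_eq_nil_iff.1 hc
      omega
    obtain ⟨s0, rest, hsuf⟩ := List.exists_cons_of_ne_nil hsufne
    rw [hsuf]
    have hs0 : s0 ∈ possible :=
      List.mem_of_mem_drop (by rw [hsuf]; exact List.mem_cons_self ..)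
    have hn0 : 1 ≤ (s0.length : Int) := pv_len_pos (hall s0 hs0)
    have hrest0 : 0 ≤ (rest.map (fun g => ((g.length : Int)))).sum := by
      apply List.sum_nonneg
      intro x hx
      simp only [List.mem_map] at hx
      rcases hx with ⟨y, _, rfl⟩
      omega
    simp only [List.map_cons, List.sum_cons]
    by_cases hsum : (s0.length : Int) + (rest.map (fun g => ((g.length : Int)))).sum = pl
    · rw [if_neg (by omega)]
      have hans : ans ≤ 0 := by
        rcases hguard with hp | ha
        · omega
        · exact ha
      have hdv : PySem.Int.floordiv ans (s0.length : Int) < 1 :=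
        (PySem.Int.floordiv_lt_iff_lt_mul (by omega)).2 (by rw [one_mul]; omega)
      rw [PySem.List.pyRange_one_eq_nil
        (by have := min_le_right bs (PySem.Int.floordiv ans (s0.length : Int)); omega)]
      simp [pvProd]
    · rw [if_pos (by omega)]

-- ===== VERDICT (by name: the statement is the Claim_ definition above) =====
theorem partition_possible_values_sum_rec_spec : Claim_equal_partition_possible_values_sum_rec := by
  intro pl ans array bs sfs possible idx _ hpre
  unfold Spec_partition_possible_values_sum_rec
  rcases hpre with ⟨h0, hle, hne⟩ | ⟨hguard, hcase⟩
  · rw [pvB_eq pl ans array bs sfs possible idx h0]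
    rw [pvA_eq bs (possible.drop idx.toNat) possible idx h0
      (by simp [List.length_drop]; omega) rfl]
    rw [results_eq_pvBres bs _ hne]
  · exact pvBenign_eq pl ans array bs sfs possible idx hguard hcase
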